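-- pv_equiv track=rewrite | github.com/BjornRo/advent_of_code | 2017/d01.py | solve
-- ===== SOURCE A (Python) =====
-- def solve(data: str) -> tuple[int, int]:
--     part1 = 0
--     part2 = 0
--
--     for i in range(len(data)):
--         if data[i] == data[(i + 1) % len(data)]:
--             part1 += int(data[i])
--         if data[i] == data[(i + len(data) // 2) % len(data)]:
--             part2 += int(data[i])
--     return part1, part2
-- ===== SOURCE B (Python) =====
-- def solve(data: str) -> tuple[int, int]:
--     n = len(data)
--     # part1: run-length encode the string; a maximal run of char c and length k
--     # contributes int(c)*(k-1); the circular wrap pair adds int(data[0]) if last==first.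
--     part1 = 0
--     if n > 0:
--         run_char = data[0]
--         run_len = 1
--         for c in data[1:]:
--             if c == run_char:
--                 run_len += 1
--             else:
--                 if run_len > 1:
--                     part1 += int(run_char) * (run_len - 1)
--                 run_char, run_len = c, 1
--         if run_len > 1:
--             part1 += int(run_char) * (run_len - 1)
--         if data[n - 1] == data[0]:
--             part1 += int(data[0])
--     # part2: even length -> the offset pairing is an involution, scan only the first
--     # half and double each match; odd length -> two modulo-free slab scans.
--     half = n // 2
--     part2 = 0
--     if n % 2 == 0:
--         for i in range(half):
--             if data[i] == data[i + half]:
--                 part2 += 2 * int(data[i])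
--     else:
--         for i in range(half + 1):
--             if data[i] == data[i + half]:
--                 part2 += int(data[i])
--         for i in range(half + 1, n):
--             if data[i] == data[i - half - 1]:
--                 part2 += int(data[i])
--     return part1, part2
-- ===== Notes on version B (the rewrite author's own statement) =====
-- stated objective: alternative
-- what changed: Part 1 is computed by run-length encoding (each maximal run of length k adds digit*(k-1), plus the circular wrap pair) instead of per-index neighbour comparisons, and part 2 scans only the first half doubling each match for even lengths (the offset pairing is an involution) and uses two modulo-free slab scans for odd lengths.
import Mathlib
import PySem

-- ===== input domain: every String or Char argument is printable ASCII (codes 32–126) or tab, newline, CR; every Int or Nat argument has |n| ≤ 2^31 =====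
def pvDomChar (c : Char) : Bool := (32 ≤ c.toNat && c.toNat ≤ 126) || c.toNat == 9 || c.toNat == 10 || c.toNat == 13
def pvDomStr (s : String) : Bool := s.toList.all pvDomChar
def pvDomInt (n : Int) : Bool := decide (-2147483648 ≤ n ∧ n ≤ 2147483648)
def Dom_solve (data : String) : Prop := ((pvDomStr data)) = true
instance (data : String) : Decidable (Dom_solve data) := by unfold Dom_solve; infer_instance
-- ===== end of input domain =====

-- B computes part 1 by run-length encoding (each maximal run of length k adds digit*(k-1), plus the
-- circular wrap pair) and part 2 by a doubled half scan for even lengths / two modulo-free slab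
-- scans for odd lengths, instead of A's single per-index modular-comparison loop; same O(n) cost.

-- ===== PORT A =====
def solve (data : String) : Int × Int :=
  let l := data.toList
  let n : Int := PySem.List.len l
  (PySem.List.pyRange 0 n 1).foldl
    (fun st i =>
      let st1 := if PySem.List.pyGetD l i ' ' = PySem.List.pyGetD l (PySem.Int.mod (i + 1) n) ' '
                 then st.1 + (PySem.Int.ofChars? [PySem.List.pyGetD l i ' ']).getD 0 else st.1
      let st2 := if PySem.List.pyGetD l i ' ' = PySem.List.pyGetD l (PySem.Int.mod (i + PySem.Int.floordiv n 2) n) ' '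
                 then st.2 + (PySem.Int.ofChars? [PySem.List.pyGetD l i ' ']).getD 0 else st.2
      (st1, st2))
    (0, 0)

-- ===== PORT B =====
-- digit value int(c) (the .getD 0 default is only reachable outside Pre_solve)
def pvVal (c : Char) : Int := (PySem.Int.ofChars? [c]).getD 0

-- one step of B's run-length loop: state (run_char, run_len, part1)
def pvRunStep (st : Char × Int × Int) (c : Char) : Char × Int × Int :=
  if c = st.1 then (st.1, st.2.1 + 1, st.2.2)
  else (c, 1, if st.2.1 > 1 then st.2.2 + pvVal st.1 * (st.2.1 - 1) else st.2.2)

-- flushing the final run after the loop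
def pvRunClose (st : Char × Int × Int) : Int :=
  if st.2.1 > 1 then st.2.2 + pvVal st.1 * (st.2.1 - 1) else st.2.2

def solve_alt (data : String) : Int × Int :=
  let l := data.toList
  let n : Int := PySem.List.len l
  let part1 : Int :=
    if 0 < n then
      let p := pvRunClose ((PySem.List.slice l (some 1) none).foldl pvRunStep
                 (PySem.List.pyGetD l 0 ' ', 1, 0))
      if PySem.List.pyGetD l (n - 1) ' ' = PySem.List.pyGetD l 0 ' '
      then p + pvVal (PySem.List.pyGetD l 0 ' ') else p
    else 0
  let half : Int := PySem.Int.floordiv n 2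
  let part2 : Int :=
    if PySem.Int.mod n 2 = 0 then
      (PySem.List.pyRange 0 half 1).foldl (fun acc i =>
        if PySem.List.pyGetD l i ' ' = PySem.List.pyGetD l (i + half) ' '
        then acc + 2 * pvVal (PySem.List.pyGetD l i ' ') else acc) 0
    else
      let p2 := (PySem.List.pyRange 0 (half + 1) 1).foldl (fun acc i =>
        if PySem.List.pyGetD l i ' ' = PySem.List.pyGetD l (i + half) ' '
        then acc + pvVal (PySem.List.pyGetD l i ' ') else acc) 0
      (PySem.List.pyRange (half + 1) n 1).foldl (fun acc i =>
        if PySem.List.pyGetD l i ' ' = PySem.List.pyGetD l (i - half - 1) ' '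
        then acc + pvVal (PySem.List.pyGetD l i ' ') else acc) p2
  (part1, part2)

-- ===== PRECONDITION & SPEC =====
-- Pre_ excludes exactly the inputs on which Python A raises ValueError: some position whose
-- neighbour (step 1 or half rotation) matches holds a non-digit character, so int() fails there.
def Pre_solve (data : String) : Prop :=
  ∀ i : Fin data.toList.length,
    (data.toList.get i =
       data.toList.get ⟨(i.val + 1) % data.toList.length, Nat.mod_lt _ i.pos⟩ →
       (data.toList.get i).isDigit = true) ∧
    (data.toList.get i =
       data.toList.get ⟨(i.val + data.toList.length / 2) % data.toList.length, Nat.mod_lt _ i.pos⟩ →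
       (data.toList.get i).isDigit = true)
instance (data : String) : Decidable (Pre_solve data) := by unfold Pre_solve; infer_instance

def pvWitness_solve : String := "91212129"

def Spec_solve (data : String) (out : Int × Int) : Prop := out = solve_alt data
instance (data : String) (out : Int × Int) : Decidable (Spec_solve data out) := by unfold Spec_solve; infer_instance

-- ===== CLAIM (what is proved, stated in full; the proofs are below) =====
def Claim_equal_solve : Prop := ∀ (data : String), Dom_solve data → Pre_solve data → Spec_solve data (solve data)

-- ===== LEMMAS AND PROOFS =====

-- sum of the matching adjacent pairs of a list (linear, no wrap)
def pvAdjSum : List Char → Int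
  | x :: y :: r => (if x = y then pvVal x else 0) + pvAdjSum (y :: r)
  | _ => 0

-- a fold that conditionally adds is a sum of a 0/ite map (glue over PySem.List.foldl_add)
theorem pv_foldl_ite_add {α : Type} (l : List α) (c : α → Prop) [DecidablePred c] (v : α → Int) (a : Int) :
    l.foldl (fun acc k => if c k then acc + v k else acc) a
      = a + (l.map (fun k => if c k then v k else 0)).sum := by
  have h : (fun (acc : Int) k => if c k then acc + v k else acc)
      = fun acc k => acc + (if c k then v k else 0) := by
    funext acc k; split <;> simp
  rw [h, PySem.List.foldl_add]

-- B's run-length loop, closed, computes the adjacent-pair sum of run_char :: rest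
theorem pv_run (t : List Char) (rc : Char) (rl acc : Int) (h : 1 ≤ rl) :
    pvRunClose (t.foldl pvRunStep (rc, rl, acc)) = pvRunClose (rc, rl, acc) + pvAdjSum (rc :: t) := by
  induction t generalizing rc rl acc with
  | nil => simp [pvAdjSum]
  | cons c t ih =>
    simp only [List.foldl_cons]
    by_cases hc : c = rc
    · subst hc
      rw [show pvRunStep (c, rl, acc) c = (c, rl + 1, acc) by simp [pvRunStep]]
      rw [ih c (rl + 1) acc (by omega)]
      have : pvRunClose (c, rl + 1, acc) = pvRunClose (c, rl, acc) + pvVal c := by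
        simp only [pvRunClose]
        by_cases h1 : rl > 1
        · rw [if_pos (by omega), if_pos h1]; ring
        · have : rl = 1 := by omega
          subst this; norm_num
      rw [this, pvAdjSum]
      simp; ring
    · rw [show pvRunStep (rc, rl, acc) c = (c, 1, pvRunClose (rc, rl, acc)) by
          simp [pvRunStep, pvRunClose, hc]]
      rw [ih c 1 _ le_rfl]
      have hne : ¬ rc = c := fun h => hc h.symm
      simp [pvRunClose, pvAdjSum, hne]

-- the adjacent-pair sum as a sum over indices
theorem pv_adjSum_eq (l : List Char) :
    pvAdjSum l = ((List.range (l.length - 1)).map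
      (fun k => if l.getD k ' ' = l.getD (k + 1) ' ' then pvVal (l.getD k ' ') else 0)).sum := by
  induction l with
  | nil => simp [pvAdjSum]
  | cons x l ih =>
    cases l with
    | nil => simp [pvAdjSum]
    | cons y r =>
      rw [pvAdjSum, ih]
      simp only [List.length_cons, Nat.add_sub_cancel]
      rw [List.range_succ_eq_map]
      simp [List.map_map, Function.comp_def]

-- value under a character-equality ite may be read off either side
theorem pv_ite_val (a b : Char) (z : Int) (v : Char → Int) :
    (if a = b then v a else z) = (if a = b then v b else z) := by
  by_cases h : a = b
  · subst h; rfl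
  · simp [h]

-- A's part-1 sum = linear adjacent-pair sum + wrap term (B's shape)
theorem pv_p1 (l : List Char) (hl : 0 < l.length) :
    ((List.range l.length).map
      (fun k => if l.getD k ' ' = l.getD ((k + 1) % l.length) ' ' then pvVal (l.getD k ' ') else 0)).sum
    = pvAdjSum l + (if l.getD (l.length - 1) ' ' = l.getD 0 ' ' then pvVal (l.getD 0 ' ') else 0) := by
  obtain ⟨m, hm⟩ : ∃ m, l.length = m + 1 := ⟨l.length - 1, by omega⟩
  rw [pv_adjSum_eq,
      show List.range l.length = List.range m ++ [m] by rw [hm, List.range_succ]]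
  simp only [List.map_append, List.sum_append, List.map_cons, List.map_nil, List.sum_cons,
    List.sum_nil]
  have e1 : ∀ k ∈ List.range m,
      (if l.getD k ' ' = l.getD ((k + 1) % l.length) ' ' then pvVal (l.getD k ' ') else 0)
        = (if l.getD k ' ' = l.getD (k + 1) ' ' then pvVal (l.getD k ' ') else 0) := by
    intro k hk
    have := List.mem_range.mp hk
    rw [Nat.mod_eq_of_lt (by omega)]
  rw [List.map_congr_left e1,
      show (m + 1) % l.length = 0 by rw [hm]; simp,
      pv_ite_val (l.getD m ' ') (l.getD 0 ' ') 0 pvVal,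
      show l.length - 1 = m by omega]
  ring

-- A's part-2 sum for even length = doubled half scan (B's shape)
theorem pv_p2_even (l : List Char) (h2 : l.length % 2 = 0) :
    ((List.range l.length).map
      (fun k => if l.getD k ' ' = l.getD ((k + l.length / 2) % l.length) ' ' then pvVal (l.getD k ' ') else 0)).sum
    = ((List.range (l.length / 2)).map
      (fun k => if l.getD k ' ' = l.getD (k + l.length / 2) ' ' then 2 * pvVal (l.getD k ' ') else 0)).sum := by
  have hn : l.length = l.length / 2 + l.length / 2 := by omega
  rw [show List.range l.length = List.range (l.length / 2) ++ (List.range (l.length / 2)).map (l.length / 2 + ·) by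
        rw [← List.range_add, ← hn]]
  rw [List.map_append, List.sum_append, List.map_map]
  have e1 : ∀ k ∈ List.range (l.length / 2),
      (if l.getD k ' ' = l.getD ((k + l.length / 2) % l.length) ' ' then pvVal (l.getD k ' ') else 0)
        = (if l.getD k ' ' = l.getD (k + l.length / 2) ' ' then pvVal (l.getD k ' ') else 0) := by
    intro k hk
    have := List.mem_range.mp hk
    rw [Nat.mod_eq_of_lt (by omega)]
  have e2 : ∀ k ∈ List.range (l.length / 2),
      ((fun k => if l.getD k ' ' = l.getD ((k + l.length / 2) % l.length) ' ' then pvVal (l.getD k ' ') else 0) ∘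
        (l.length / 2 + ·)) k
        = (if l.getD k ' ' = l.getD (k + l.length / 2) ' ' then pvVal (l.getD k ' ') else 0) := by
    intro k hk
    have hk' := List.mem_range.mp hk
    simp only [Function.comp_apply]
    rw [show l.length / 2 + k + l.length / 2 = k + l.length by omega, Nat.add_mod_right,
        Nat.mod_eq_of_lt (by omega),
        Nat.add_comm (l.length / 2) k,
        pv_ite_val (l.getD (k + l.length / 2) ' ') (l.getD k ' ') 0 pvVal]
    by_cases h : l.getD k ' ' = l.getD (k + l.length / 2) ' '
    · rw [if_pos h.symm, if_pos h]
    · rw [if_neg (fun h' => h h'.symm), if_neg h]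
  rw [List.map_congr_left e1, List.map_congr_left e2, ← PySem.List.sum_map_add_int]
  congr 1
  congr 1
  funext k
  by_cases h : l.getD k ' ' = l.getD (k + l.length / 2) ' '
  · simp only [if_pos h]; ring
  · simp only [if_neg h]; ring

-- A's part-2 sum for odd length = two modulo-free slab sums (B's shape)
theorem pv_p2_odd (l : List Char) (h2 : l.length % 2 = 1) :
    ((List.range l.length).map
      (fun k => if l.getD k ' ' = l.getD ((k + l.length / 2) % l.length) ' ' then pvVal (l.getD k ' ') else 0)).sum
    = ((List.range (l.length / 2 + 1)).map
        (fun k => if l.getD k ' ' = l.getD (k + l.length / 2) ' ' then pvVal (l.getD k ' ') else 0)).sum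
      + ((List.range (l.length / 2)).map
        (fun k => if l.getD (l.length / 2 + 1 + k) ' ' = l.getD k ' ' then pvVal (l.getD (l.length / 2 + 1 + k) ' ') else 0)).sum := by
  have hn : l.length = (l.length / 2 + 1) + l.length / 2 := by omega
  rw [show List.range l.length = List.range (l.length / 2 + 1) ++ (List.range (l.length / 2)).map (l.length / 2 + 1 + ·) by
        rw [← List.range_add, ← hn]]
  rw [List.map_append, List.sum_append, List.map_map]
  have e1 : ∀ k ∈ List.range (l.length / 2 + 1),
      (if l.getD k ' ' = l.getD ((k + l.length / 2) % l.length) ' ' then pvVal (l.getD k ' ') else 0)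
        = (if l.getD k ' ' = l.getD (k + l.length / 2) ' ' then pvVal (l.getD k ' ') else 0) := by
    intro k hk
    have := List.mem_range.mp hk
    rw [Nat.mod_eq_of_lt (by omega)]
  have e2 : ∀ k ∈ List.range (l.length / 2),
      ((fun k => if l.getD k ' ' = l.getD ((k + l.length / 2) % l.length) ' ' then pvVal (l.getD k ' ') else 0) ∘
        (l.length / 2 + 1 + ·)) k
        = (if l.getD (l.length / 2 + 1 + k) ' ' = l.getD k ' ' then pvVal (l.getD (l.length / 2 + 1 + k) ' ') else 0) := by
    intro k hk
    have hk' := List.mem_range.mp hk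
    simp only [Function.comp_apply]
    rw [show l.length / 2 + 1 + k + l.length / 2 = k + l.length by omega, Nat.add_mod_right,
        Nat.mod_eq_of_lt (by omega)]
  rw [List.map_congr_left e1, List.map_congr_left e2]

-- A's per-index circular sums, Nat-indexed
def pvS1 (l : List Char) : Int :=
  ((List.range l.length).map
    (fun k => if l.getD k ' ' = l.getD ((k + 1) % l.length) ' ' then pvVal (l.getD k ' ') else 0)).sum
def pvS2 (l : List Char) : Int :=
  ((List.range l.length).map
    (fun k => if l.getD k ' ' = l.getD ((k + l.length / 2) % l.length) ' ' then pvVal (l.getD k ' ') else 0)).sum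

-- A's loop computes the pair of circular sums
theorem pv_A (l : List Char) :
    (PySem.List.pyRange 0 (PySem.List.len l) 1).foldl
      (fun st i =>
        let st1 := if PySem.List.pyGetD l i ' ' = PySem.List.pyGetD l (PySem.Int.mod (i + 1) (PySem.List.len l)) ' '
                   then st.1 + (PySem.Int.ofChars? [PySem.List.pyGetD l i ' ']).getD 0 else st.1
        let st2 := if PySem.List.pyGetD l i ' ' = PySem.List.pyGetD l (PySem.Int.mod (i + PySem.Int.floordiv (PySem.List.len l) 2) (PySem.List.len l)) ' '
                   then st.2 + (PySem.Int.ofChars? [PySem.List.pyGetD l i ' ']).getD 0 else st.2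
        (st1, st2))
      (0, 0)
    = (pvS1 l, pvS2 l) := by
  simp only [PySem.List.len_eq]
  rw [PySem.List.pyRange_zero_natCast, List.foldl_map]
  have hdiv : PySem.Int.floordiv (l.length : Int) 2 = ((l.length / 2 : Nat) : Int) := by
    exact_mod_cast PySem.Int.floordiv_natCast l.length 2
  have hstep : List.foldl (fun (st : Int × Int) (k : Nat) =>
      (if PySem.List.pyGetD l (k : Int) ' ' = PySem.List.pyGetD l (PySem.Int.mod ((k : Int) + 1) (l.length : Int)) ' '
         then st.1 + (PySem.Int.ofChars? [PySem.List.pyGetD l (k : Int) ' ']).getD 0 else st.1,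
       if PySem.List.pyGetD l (k : Int) ' ' = PySem.List.pyGetD l (PySem.Int.mod ((k : Int) + PySem.Int.floordiv (l.length : Int) 2) (l.length : Int)) ' '
         then st.2 + (PySem.Int.ofChars? [PySem.List.pyGetD l (k : Int) ' ']).getD 0 else st.2))
      (0, 0) (List.range l.length)
      = List.foldl (fun (st : Int × Int) (k : Nat) =>
      ((fun (a : Int) (k : Nat) => if l.getD k ' ' = l.getD ((k + 1) % l.length) ' ' then a + pvVal (l.getD k ' ') else a) st.1 k,
       (fun (a : Int) (k : Nat) => if l.getD k ' ' = l.getD ((k + l.length / 2) % l.length) ' ' then a + pvVal (l.getD k ' ') else a) st.2 k))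
      (0, 0) (List.range l.length) := by
    apply PySem.List.foldl_congr_mem
    intro st k _
    rw [hdiv,
      show ((k : Int) + 1) = ((k + 1 : Nat) : Int) by push_cast; ring,
      show ((k : Int) + ((l.length / 2 : Nat) : Int)) = ((k + l.length / 2 : Nat) : Int) by push_cast; ring,
      PySem.Int.mod_natCast, PySem.Int.mod_natCast,
      PySem.List.pyGetD_natCast, PySem.List.pyGetD_natCast, PySem.List.pyGetD_natCast]
    simp only [pvVal, List.getD_eq_getElem?_getD]
  refine Eq.trans hstep ?_
  rw [PySem.List.foldl_prod_mk
        (f := fun (a : Int) (k : Nat) => if l.getD k ' ' = l.getD ((k + 1) % l.length) ' ' then a + pvVal (l.getD k ' ') else a)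
        (g := fun (a : Int) (k : Nat) => if l.getD k ' ' = l.getD ((k + l.length / 2) % l.length) ' ' then a + pvVal (l.getD k ' ') else a),
      pv_foldl_ite_add, pv_foldl_ite_add]
  simp [pvS1, pvS2]

-- B's part-1 block computes pvS1
theorem pv_B1 (c0 : Char) (t : List Char) :
    (if (0 : Int) < PySem.List.len (c0 :: t) then
       let p := pvRunClose ((PySem.List.slice (c0 :: t) (some 1) none).foldl pvRunStep
                  (PySem.List.pyGetD (c0 :: t) 0 ' ', 1, 0))
       if PySem.List.pyGetD (c0 :: t) (PySem.List.len (c0 :: t) - 1) ' ' = PySem.List.pyGetD (c0 :: t) 0 ' '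
       then p + pvVal (PySem.List.pyGetD (c0 :: t) 0 ' ') else p
     else 0) = pvS1 (c0 :: t) := by
  have hlen : 0 < (c0 :: t).length := by simp
  rw [pvS1, pv_p1 (c0 :: t) hlen]
  rw [if_pos (by simp [PySem.List.len_eq])]
  rw [PySem.List.slice_from_one]
  simp only [List.tail_cons]
  have h0 : PySem.List.pyGetD (c0 :: t) 0 ' ' = c0 := by
    simp [PySem.List.pyGetD_ofNat']
  rw [h0, pv_run t c0 1 0 le_rfl,
      show pvRunClose (c0, 1, 0) = 0 by simp [pvRunClose]]
  have hw : PySem.List.pyGetD (c0 :: t) (PySem.List.len (c0 :: t) - 1) ' ' = (c0 :: t).getD ((c0 :: t).length - 1) ' ' := by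
    rw [PySem.List.len_eq,
        show (((c0 :: t).length : Int) - 1) = ((t.length : Nat) : Int) by simp,
        PySem.List.pyGetD_natCast]
    simp
  rw [hw, show (c0 :: t).getD 0 ' ' = c0 by simp]
  by_cases h : (c0 :: t).getD ((c0 :: t).length - 1) ' ' = c0
  · rw [if_pos h, if_pos h]; ring
  · rw [if_neg h, if_neg h]; ring

-- B's part-2 block computes pvS2
theorem pv_B2 (l : List Char) :
    (if PySem.Int.mod (PySem.List.len l) 2 = 0 then
      (PySem.List.pyRange 0 (PySem.Int.floordiv (PySem.List.len l) 2) 1).foldl (fun acc i =>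
        if PySem.List.pyGetD l i ' ' = PySem.List.pyGetD l (i + PySem.Int.floordiv (PySem.List.len l) 2) ' '
        then acc + 2 * pvVal (PySem.List.pyGetD l i ' ') else acc) 0
    else
      let p2 := (PySem.List.pyRange 0 (PySem.Int.floordiv (PySem.List.len l) 2 + 1) 1).foldl (fun acc i =>
        if PySem.List.pyGetD l i ' ' = PySem.List.pyGetD l (i + PySem.Int.floordiv (PySem.List.len l) 2) ' '
        then acc + pvVal (PySem.List.pyGetD l i ' ') else acc) 0
      (PySem.List.pyRange (PySem.Int.floordiv (PySem.List.len l) 2 + 1) (PySem.List.len l) 1).foldl (fun acc i =>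
        if PySem.List.pyGetD l i ' ' = PySem.List.pyGetD l (i - PySem.Int.floordiv (PySem.List.len l) 2 - 1) ' '
        then acc + pvVal (PySem.List.pyGetD l i ' ') else acc) p2)
    = pvS2 l := by
  have hdiv : PySem.Int.floordiv ((l.length : Nat) : Int) 2 = ((l.length / 2 : Nat) : Int) := by
    exact_mod_cast PySem.Int.floordiv_natCast l.length 2
  have hmod : PySem.Int.mod ((l.length : Nat) : Int) 2 = ((l.length % 2 : Nat) : Int) := by
    exact_mod_cast PySem.Int.mod_natCast l.length 2
  simp only [PySem.List.len_eq]
  simp only [hdiv, hmod]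
  by_cases hp : l.length % 2 = 0
  · rw [if_pos (by rw [hp]; simp)]
    rw [PySem.List.pyRange_zero_natCast, List.foldl_map]
    have hc : List.foldl (fun (acc : Int) (k : Nat) =>
        if PySem.List.pyGetD l (k : Int) ' ' = PySem.List.pyGetD l ((k : Int) + ((l.length / 2 : Nat) : Int)) ' '
        then acc + 2 * pvVal (PySem.List.pyGetD l (k : Int) ' ') else acc) 0 (List.range (l.length / 2))
        = List.foldl (fun (acc : Int) (k : Nat) =>
        if l.getD k ' ' = l.getD (k + l.length / 2) ' '
        then acc + 2 * pvVal (l.getD k ' ') else acc) 0 (List.range (l.length / 2)) := by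
      apply PySem.List.foldl_congr_mem
      intro acc k _
      rw [show ((k : Int) + ((l.length / 2 : Nat) : Int)) = ((k + l.length / 2 : Nat) : Int) by push_cast; ring,
          PySem.List.pyGetD_natCast, PySem.List.pyGetD_natCast]
    rw [hc, pv_foldl_ite_add (List.range (l.length / 2))
          (fun k => l.getD k ' ' = l.getD (k + l.length / 2) ' ')
          (fun k => 2 * pvVal (l.getD k ' ')) 0,
        zero_add, pvS2, pv_p2_even l hp]
  · have hp1 : l.length % 2 = 1 := by omega
    rw [if_neg (by rw [hp1]; simp)]
    rw [show (((l.length / 2 : Nat) : Int) + 1) = ((l.length / 2 + 1 : Nat) : Int) by push_cast; ring]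
    rw [PySem.List.pyRange_zero_natCast, List.foldl_map]
    have hc1 : List.foldl (fun (acc : Int) (k : Nat) =>
        if PySem.List.pyGetD l (k : Int) ' ' = PySem.List.pyGetD l ((k : Int) + ((l.length / 2 : Nat) : Int)) ' '
        then acc + pvVal (PySem.List.pyGetD l (k : Int) ' ') else acc) 0 (List.range (l.length / 2 + 1))
        = List.foldl (fun (acc : Int) (k : Nat) =>
        if l.getD k ' ' = l.getD (k + l.length / 2) ' '
        then acc + pvVal (l.getD k ' ') else acc) 0 (List.range (l.length / 2 + 1)) := by
      apply PySem.List.foldl_congr_mem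
      intro acc k _
      rw [show ((k : Int) + ((l.length / 2 : Nat) : Int)) = ((k + l.length / 2 : Nat) : Int) by push_cast; ring,
          PySem.List.pyGetD_natCast, PySem.List.pyGetD_natCast]
    rw [hc1]
    rw [PySem.List.pyRange_one, List.foldl_map]
    have hlen2 : (((l.length : Nat) : Int) - ((l.length / 2 + 1 : Nat) : Int)).toNat = l.length / 2 := by
      omega
    rw [hlen2]
    have hc2 : ∀ (p : Int), List.foldl (fun (acc : Int) (k : Nat) =>
        if PySem.List.pyGetD l (((l.length / 2 + 1 : Nat) : Int) + (k : Int)) ' '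
             = PySem.List.pyGetD l (((l.length / 2 + 1 : Nat) : Int) + (k : Int) - ((l.length / 2 : Nat) : Int) - 1) ' '
        then acc + pvVal (PySem.List.pyGetD l (((l.length / 2 + 1 : Nat) : Int) + (k : Int)) ' ') else acc) p (List.range (l.length / 2))
        = List.foldl (fun (acc : Int) (k : Nat) =>
        if l.getD (l.length / 2 + 1 + k) ' ' = l.getD k ' '
        then acc + pvVal (l.getD (l.length / 2 + 1 + k) ' ') else acc) p (List.range (l.length / 2)) := by
      intro p
      apply PySem.List.foldl_congr_mem
      intro acc k _
      rw [show (((l.length / 2 + 1 : Nat) : Int) + (k : Int)) = ((l.length / 2 + 1 + k : Nat) : Int) by push_cast; ring,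
          show (((l.length / 2 + 1 + k : Nat) : Int) - ((l.length / 2 : Nat) : Int) - 1) = ((k : Nat) : Int) by push_cast; ring,
          PySem.List.pyGetD_natCast, PySem.List.pyGetD_natCast]
    rw [hc2]
    rw [pv_foldl_ite_add (List.range (l.length / 2 + 1))
          (fun k => l.getD k ' ' = l.getD (k + l.length / 2) ' ')
          (fun k => pvVal (l.getD k ' ')) 0,
        zero_add,
        pv_foldl_ite_add (List.range (l.length / 2))
          (fun k => l.getD (l.length / 2 + 1 + k) ' ' = l.getD k ' ')
          (fun k => pvVal (l.getD (l.length / 2 + 1 + k) ' ')) _,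
        pvS2, pv_p2_odd l hp1]

theorem pv_main (data : String) : solve data = solve_alt data := by
  unfold solve solve_alt
  cases hl : data.toList with
  | nil => simp [PySem.List.len, PySem.List.pyRange, PySem.Int.floordiv, PySem.Int.mod]
  | cons c0 t =>
    exact (pv_A (c0 :: t)).trans
      (congrArg₂ Prod.mk (pv_B1 c0 t).symm (pv_B2 (c0 :: t)).symm)

-- ===== VERDICT (by name: the statement is the Claim_ definition above) =====
theorem solve_spec : Claim_equal_solve := by
  intro data _ _
  unfold Spec_solve
  exact pv_main data
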